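-- pv_equiv track=rewrite | github.com/alSheiye5h/Morocco-All_Shares-Index | CasaBourseScrapper/scrapper/utils.py | getTable4
-- ===== SOURCE A (Python) =====
-- def cleanText(text):
--     return text.replace(",",".").replace("%","").replace("\xa0","").replace("Â","")
--
-- def getTable4(t):
--     a=dict()
--     i=0
--     Date = []
--     Variation = []
--     Cloture = []
--     Volume = []
--     Ouverture =[]
--     Plus_haut = []
--     Plus_bas=[]
--     while i<len(t):
--         Date.append(t[i])
--         Variation.append(t[i+1])
--         Cloture.append(t[i+2])
--         Volume.append(t[i+3])
--         Ouverture.append(t[i+4])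
--         Plus_haut.append(t[i+5])
--         Plus_bas.append(t[i+6])
--         i+=7
--     a["Date"]=list(map(cleanText,Date))
--     a["Variation"]=list(map(cleanText,Variation))
--     a["Cloture"]=list(map(cleanText,Cloture))
--     a["Volume"]=list(map(cleanText,Volume))
--     a["Ouverture"]=list(map(cleanText,Ouverture))
--     a["Plus_haut"]=list(map(cleanText,Plus_haut))
--     a["Plus_bas"]=list(map(cleanText,Plus_bas))
--     return a
-- ===== SOURCE B (Python) =====
-- def cleanText(text):
--     return text.replace(",",".").replace("%","").replace("\xa0","").replace("Â","")
--
-- def getTable4(t):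
--     keys = ["Date", "Variation", "Cloture", "Volume", "Ouverture", "Plus_haut", "Plus_bas"]
--     return {k: [cleanText(t[i + j]) for i in range(0, len(t), 7)]
--             for j, k in enumerate(keys)}
-- ===== Notes on version B (the rewrite author's own statement) =====
-- stated objective: simpler
-- what changed: Replaces the row-major while-loop that appends into seven parallel accumulator lists (then maps cleanText over each) with a dict comprehension that builds each of the seven columns directly by a strided column-major scan t[i+j] for i in range(0, len(t), 7).
import Mathlib
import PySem

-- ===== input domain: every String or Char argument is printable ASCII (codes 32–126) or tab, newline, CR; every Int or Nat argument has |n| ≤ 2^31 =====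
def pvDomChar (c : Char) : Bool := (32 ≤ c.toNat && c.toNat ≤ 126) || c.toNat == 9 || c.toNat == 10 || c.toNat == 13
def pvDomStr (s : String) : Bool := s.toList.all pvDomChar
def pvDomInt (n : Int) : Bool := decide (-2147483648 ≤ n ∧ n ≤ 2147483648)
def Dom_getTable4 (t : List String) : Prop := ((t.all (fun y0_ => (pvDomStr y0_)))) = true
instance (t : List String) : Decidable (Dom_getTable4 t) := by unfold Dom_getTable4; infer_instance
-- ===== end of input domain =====

-- B replaces A's row-major while-loop over seven accumulator lists by a per-column strided
-- comprehension (dict comprehension over the seven keys); same cost, simpler decomposition.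
-- Pre_ excludes lists whose length is not a multiple of 7, on which BOTH programs raise IndexError.

-- ===== PORT A =====
-- cleanText, shared verbatim by both Python sources
def pvClean (s : String) : String :=
  PySem.Str.replace (PySem.Str.replace (PySem.Str.replace
    (PySem.Str.replace s "," ".") "%" "") "\u00A0" "") "Â" ""

-- the while-loop of A: seven parallel accumulators, row-major; t[i+k] is pyGetD
-- (in range on every admitted input; Pre_ excludes the lengths where Python raises IndexError)
def pvLoopA (t : List String) (i : Nat)
    (D V C Vo O Ph Pb : List String) :
    List String × List String × List String × List String × List String × List String × List String :=
  if i < t.length then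
    pvLoopA t (i + 7)
      (D ++ [PySem.List.pyGetD t (i : Int) ""])
      (V ++ [PySem.List.pyGetD t ((i : Int) + 1) ""])
      (C ++ [PySem.List.pyGetD t ((i : Int) + 2) ""])
      (Vo ++ [PySem.List.pyGetD t ((i : Int) + 3) ""])
      (O ++ [PySem.List.pyGetD t ((i : Int) + 4) ""])
      (Ph ++ [PySem.List.pyGetD t ((i : Int) + 5) ""])
      (Pb ++ [PySem.List.pyGetD t ((i : Int) + 6) ""])
  else (D, V, C, Vo, O, Ph, Pb)
termination_by t.length - i

def getTable4 (t : List String) : List (String × List String) :=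
  let r := pvLoopA t 0 [] [] [] [] [] [] []
  ((((((((PySem.Dict.empty.insert "Date" (r.1.map pvClean)).insert
    "Variation" (r.2.1.map pvClean)).insert
    "Cloture" (r.2.2.1.map pvClean)).insert
    "Volume" (r.2.2.2.1.map pvClean)).insert
    "Ouverture" (r.2.2.2.2.1.map pvClean)).insert
    "Plus_haut" (r.2.2.2.2.2.1.map pvClean)).insert
    "Plus_bas" (r.2.2.2.2.2.2.map pvClean)).items)

-- ===== PORT B =====
def pvKeys : List String := ["Date", "Variation", "Cloture", "Volume", "Ouverture", "Plus_haut", "Plus_bas"]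

def getTable4_alt (t : List String) : List (String × List String) :=
  (PySem.List.enumerate pvKeys 0).map (fun jk =>
    (jk.2, (PySem.List.pyRange 0 (t.length : Int) 7).map
      (fun i => pvClean (PySem.List.pyGetD t (i + jk.1) ""))))

-- ===== PRECONDITION & SPEC =====
-- Pre_ excludes exactly the lists whose length is not a multiple of 7: there the Python A
-- raises IndexError (and B raises too), so nothing is claimed about them.
def Pre_getTable4 (t : List String) : Prop := t.length % 7 = 0
instance (t : List String) : Decidable (Pre_getTable4 t) := by unfold Pre_getTable4; infer_instance
def pvWitness_getTable4 : List String := ["1,2", "0.5%", "a", "b", "c", "d", "e"]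
def Spec_getTable4 (t : List String) (out : List (String × List String)) : Prop := out = getTable4_alt t
instance (t : List String) (out : List (String × List String)) : Decidable (Spec_getTable4 t out) := by unfold Spec_getTable4; infer_instance

-- ===== CLAIM (what is proved, stated in full; the proofs are below) =====
def Claim_equal_getTable4 : Prop := ∀ (t : List String), Dom_getTable4 t → Pre_getTable4 t → Spec_getTable4 t (getTable4 t)

-- ===== LEMMAS AND PROOFS =====

-- induction forms for range(·, ·, 7)
theorem pvRange7_nil (a b : Int) (h : b ≤ a) : PySem.List.pyRange a b 7 = [] := by
  rw [PySem.List.pyRange_of_pos a b (by norm_num)]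
  simp [show ¬ a < b by omega]

theorem pvRange7_cons (a b : Int) (h : a < b) :
    PySem.List.pyRange a b 7 = a :: PySem.List.pyRange (a + 7) b 7 := by
  rw [PySem.List.pyRange_of_pos a b (by norm_num), PySem.List.pyRange_of_pos (a + 7) b (by norm_num)]
  have hcnt : ((b - a + 7 - 1) / 7).toNat
      = (if a + 7 < b then ((b - (a + 7) + 7 - 1) / 7).toNat else 0) + 1 := by
    split_ifs with h7 <;> omega
  rw [if_pos h, hcnt, List.range_succ_eq_map]
  simp only [List.map_cons, List.map_map]
  congr 1
  · omega
  · apply List.map_congr_left; intro k _; simp [Function.comp]; omega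

-- column j of t starting at row index a, stride 7
def pvCol (t : List String) (a j : Int) : List String :=
  (PySem.List.pyRange a (t.length : Int) 7).map (fun i => PySem.List.pyGetD t (i + j) "")

theorem pvCol_nil (t : List String) (a j : Int) (h : (t.length : Int) ≤ a) :
    pvCol t a j = [] := by simp [pvCol, pvRange7_nil _ _ h]

theorem pvCol_cons (t : List String) (a j : Int) (h : a < (t.length : Int)) :
    pvCol t a j = PySem.List.pyGetD t (a + j) "" :: pvCol t (a + 7) j := by
  simp [pvCol, pvRange7_cons _ _ h]

theorem pvLoopA_spec (t : List String) : ∀ (i : Nat) (D V C Vo O Ph Pb : List String),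
    i ≤ t.length → (t.length - i) % 7 = 0 →
    pvLoopA t i D V C Vo O Ph Pb =
      (D ++ pvCol t i 0, V ++ pvCol t i 1, C ++ pvCol t i 2, Vo ++ pvCol t i 3,
       O ++ pvCol t i 4, Ph ++ pvCol t i 5, Pb ++ pvCol t i 6) := by
  intro i D V C Vo O Ph Pb
  induction i, D, V, C, Vo, O, Ph, Pb using pvLoopA.induct t with
  | case1 i D V C Vo O Ph Pb h ih =>
    intro hle hmod
    have h7 : i + 7 ≤ t.length := by omega
    rw [pvLoopA, if_pos h, ih h7 (by omega)]
    have hcons : ∀ j : Int, pvCol t i j = PySem.List.pyGetD t ((i : Int) + j) "" :: pvCol t ((i : Int) + 7) j := by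
      intro j; exact pvCol_cons t i j (by exact_mod_cast h)
    have hcast : ((i + 7 : Nat) : Int) = (i : Int) + 7 := by push_cast; ring
    simp only [hcast, hcons]
    simp [List.append_assoc]
  | case2 i D V C Vo O Ph Pb h =>
    intro hle hmod
    have hi : (t.length : Int) ≤ (i : Int) := by exact_mod_cast Nat.le_of_not_lt h
    rw [pvLoopA, if_neg h]
    simp [pvCol_nil t i _ hi]

theorem getTable4_spec' (t : List String) (hpre : Pre_getTable4 t) :
    getTable4 t = getTable4_alt t := by
  have h0 : (t.length - 0) % 7 = 0 := by simpa using hpre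
  unfold getTable4
  rw [pvLoopA_spec t 0 [] [] [] [] [] [] [] (Nat.zero_le _) h0]
  simp only [List.nil_append, Nat.cast_zero]
  unfold getTable4_alt pvKeys
  simp only [PySem.List.enumerate_cons, PySem.List.enumerate_nil, List.map_cons, List.map_nil]
  norm_num [pvCol, List.map_map, Function.comp]
  rfl

-- ===== VERDICT (by name: the statement is the Claim_ definition above) =====
theorem getTable4_spec : Claim_equal_getTable4 := by
  intro t _ hpre
  unfold Spec_getTable4
  exact getTable4_spec' t hpre
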